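-- pv_equiv track=rewrite | github.com/k0d3K/AdventOfCode | 2024/Day9/part2.py | find_free_spans
-- ===== SOURCE A (Python) =====
-- def find_free_spans(files):
-- 	spans = []
-- 	start = None
-- 	for i, block in enumerate(files):
-- 		if block == '.':
-- 			if start is None:
-- 				start = i
-- 		elif start is not None:
-- 			spans.append((start, i - start))
-- 			start = None
-- 	if start is not None:
-- 		spans.append((start, len(files) - start))
-- 	return spans
-- ===== SOURCE B (Python) =====
-- def find_free_spans(files):
-- 	spans = []
-- 	i = 0
-- 	n = len(files)
-- 	while i < n:
-- 		j = i
-- 		while j < n and files[j] == files[i]: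
-- 			j += 1
-- 		if files[i] == '.':
-- 			spans.append((i, j - i))
-- 		i = j
-- 	return spans
-- ===== Notes on version B (the rewrite author's own statement) =====
-- stated objective: alternative
-- what changed: Replaced the per-element sentinel state machine (Optional start carried across iterations plus a trailing flush) by a run-oriented two-pointer pass that finds each maximal run of equal blocks at once and emits (start, length) directly for '.' runs, with no carried state and no final flush.
import Mathlib
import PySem

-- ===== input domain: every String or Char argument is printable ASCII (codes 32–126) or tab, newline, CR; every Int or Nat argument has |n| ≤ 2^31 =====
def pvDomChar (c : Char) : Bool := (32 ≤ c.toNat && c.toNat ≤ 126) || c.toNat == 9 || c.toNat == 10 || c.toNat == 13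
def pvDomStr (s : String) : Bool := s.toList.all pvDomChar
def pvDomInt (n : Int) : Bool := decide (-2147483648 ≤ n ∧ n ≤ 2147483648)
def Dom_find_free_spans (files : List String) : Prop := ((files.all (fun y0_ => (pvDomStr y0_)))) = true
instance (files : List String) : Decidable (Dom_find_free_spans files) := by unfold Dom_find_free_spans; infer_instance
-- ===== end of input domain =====

-- B replaces A's per-element sentinel state machine by a run-oriented two-pointer pass
-- over maximal runs of equal blocks; same O(n) cost, different shape (objective: alternative).

-- ===== PORT A =====
-- A's loop 'for i, block in enumerate(files)' carrying (spans, start); the final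
-- 'if start is not None' flush is the [] case, where i = len(files).
def pvGoA : List String → Int → List (Int × Int) → Option Int → List (Int × Int)
  | [], i, spans, start =>
      match start with
      | some s => spans ++ [(s, i - s)]
      | none => spans
  | block :: rest, i, spans, start =>
      if block == "." then
        match start with
        | none => pvGoA rest (i + 1) spans (some i)
        | some s => pvGoA rest (i + 1) spans (some s)
      else
        match start with
        | some s => pvGoA rest (i + 1) (spans ++ [(s, i - s)]) none
        | none => pvGoA rest (i + 1) spans none

def find_free_spans (files : List String) : List (Int × Int) :=
  pvGoA files 0 [] none

-- ===== PORT B =====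
-- B's outer while loop: at position pos with remaining suffix x :: xs, the inner
-- while loop computes the end of the maximal run of blocks equal to x.
def pvGoB : List String → Int → List (Int × Int)
  | [], _ => []
  | x :: xs, pos =>
      let run := xs.takeWhile (· == x)
      let rest := xs.dropWhile (· == x)
      let L : Int := 1 + run.length
      (if x == "." then [(pos, L)] else []) ++ pvGoB rest (pos + L)
  termination_by xs _ => xs.length
  decreasing_by
    simp only [List.length_cons]
    exact Nat.lt_succ_of_le (List.length_dropWhile_le _ _)

def find_free_spans_alt (files : List String) : List (Int × Int) :=
  pvGoB files 0

-- ===== PRECONDITION & SPEC =====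
def Spec_find_free_spans (files : List String) (out : List (Int × Int)) : Prop := out = find_free_spans_alt files
instance (files : List String) (out : List (Int × Int)) : Decidable (Spec_find_free_spans files out) := by unfold Spec_find_free_spans; infer_instance

-- ===== CLAIM (what is proved, stated in full; the proofs are below) =====
def Claim_equal_find_free_spans : Prop := ∀ (files : List String), Dom_find_free_spans files → Spec_find_free_spans files (find_free_spans files)

-- ===== LEMMAS AND PROOFS =====

-- Over a run of dots, A keeps state (spans, some s) unchanged.
theorem pvGoA_dots (ds : List String) (h : ∀ y ∈ ds, y == ".") :
    ∀ (rest : List String) (i : Int) (spans : List (Int × Int)) (s : Int),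
    pvGoA (ds ++ rest) i spans (some s) = pvGoA rest (i + ds.length) spans (some s) := by
  induction ds with
  | nil => intro rest i spans s; simp
  | cons d ds ih =>
      intro rest i spans s
      have hd : d == "." := h d (List.mem_cons_self)
      simp only [List.cons_append, pvGoA, hd, if_pos]
      rw [ih (fun y hy => h y (List.mem_cons_of_mem _ hy))]
      rw [show i + 1 + (ds.length : Int) = i + ((d :: ds).length : Int) by
        push_cast [List.length_cons]; ring]

-- Over a run of non-dots, A keeps state (spans, none) unchanged.
theorem pvGoA_nondots (es : List String) (h : ∀ y ∈ es, (y == ".") = false) :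
    ∀ (rest : List String) (i : Int) (spans : List (Int × Int)),
    pvGoA (es ++ rest) i spans none = pvGoA rest (i + es.length) spans none := by
  induction es with
  | nil => intro rest i spans; simp
  | cons e es ih =>
      intro rest i spans
      have he : (e == ".") = false := h e (List.mem_cons_self)
      simp only [List.cons_append, pvGoA, he, Bool.false_eq_true, if_false]
      rw [ih (fun y hy => h y (List.mem_cons_of_mem _ hy))]
      rw [show i + 1 + (es.length : Int) = i + ((e :: es).length : Int) by
        push_cast [List.length_cons]; ring]

-- The first element left by dropWhile fails the predicate.
theorem pvDropWhile_head_false {α : Type} (p : α → Bool) :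
    ∀ (l : List α) (y : α) (ys : List α), l.dropWhile p = y :: ys → p y = false := by
  intro l
  induction l with
  | nil => intro y ys h; simp [List.dropWhile] at h
  | cons a l ih =>
      intro y ys h
      by_cases hp : p a
      · rw [List.dropWhile_cons_of_pos hp] at h; exact ih _ _ h
      · rw [List.dropWhile_cons_of_neg hp] at h
        cases h; simpa using hp

-- Main invariant: A's loop from state (spans, none) computes spans ++ B's run pass.
theorem pvGoA_eq_pvGoB (n : Nat) :
    ∀ (xs : List String), xs.length ≤ n →
    ∀ (i : Int) (spans : List (Int × Int)),
    pvGoA xs i spans none = spans ++ pvGoB xs i := by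
  induction n with
  | zero =>
      intro xs hxs i spans
      have : xs = [] := List.length_eq_zero_iff.mp (Nat.le_zero.mp hxs)
      subst this; simp [pvGoA, pvGoB]
  | succ n IH =>
      intro xs hxs i spans
      match xs with
      | [] => simp [pvGoA, pvGoB]
      | x :: xs =>
        have hxsn : xs.length ≤ n := by simpa using hxs
        have hsplit := List.takeWhile_append_dropWhile (p := (· == x)) (l := xs)
        have hrestle : (xs.dropWhile (· == x)).length ≤ n :=
          le_trans (List.length_dropWhile_le _ _) hxsn
        by_cases hx : x == "."
        · -- head is '.', a dot run
          have hxeq : x = "." := by simpa using hx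
          have hds : ∀ y ∈ xs.takeWhile (· == x), y == "." := by
            intro y hy
            have := List.mem_takeWhile_imp hy
            simpa [hxeq] using this
          simp only [pvGoA, hx, if_pos]
          conv_lhs => rw [← hsplit]
          rw [pvGoA_dots _ hds]
          simp only [pvGoB, hx, if_pos, List.cons_append, List.nil_append]
          match hr : xs.dropWhile (· == x) with
          | [] =>
              simp only [pvGoA, pvGoB]
              rw [show i + 1 + ((xs.takeWhile (· == x)).length : Int) - i
                    = 1 + ((xs.takeWhile (· == x)).length : Int) by ring]
          | y :: ys =>
              have hyx : (y == x) = false := pvDropWhile_head_false (fun z => z == x) xs y ys hr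
              have hy : (y == ".") = false := by rw [← hxeq]; exact hyx
              simp only [pvGoA, hy, Bool.false_eq_true, if_false]
              have hstep : ∀ (S : List (Int × Int)) (j : Int),
                  pvGoA ys (j + 1) (S ++ [(i, j - i)]) none
                    = pvGoA (y :: ys) j (S ++ [(i, j - i)]) none := by
                intro S j; simp [pvGoA, hy]
              rw [hstep]
              rw [← hr, IH _ hrestle, hr]
              rw [show i + 1 + ((xs.takeWhile (· == x)).length : Int) - i
                    = 1 + ((xs.takeWhile (· == x)).length : Int) by ring,
                  show i + 1 + ((xs.takeWhile (· == x)).length : Int)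
                    = i + (1 + ((xs.takeWhile (· == x)).length : Int)) by ring]
              simp
        · -- head is not '.', a non-dot run is skipped
          have hxf : (x == ".") = false := by simpa using hx
          have hes : ∀ y ∈ xs.takeWhile (· == x), (y == ".") = false := by
            intro y hy
            have hyx : y == x := List.mem_takeWhile_imp (p := (· == x)) hy
            have : y = x := by simpa using hyx
            subst this; exact hxf
          simp only [pvGoA, hxf, Bool.false_eq_true, if_false]
          conv_lhs => rw [← hsplit]
          rw [pvGoA_nondots _ hes]
          rw [IH _ hrestle]
          simp only [pvGoB, hxf, Bool.false_eq_true, if_false, List.nil_append]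
          rw [show i + 1 + ((xs.takeWhile (· == x)).length : Int)
                = i + (1 + ((xs.takeWhile (· == x)).length : Int)) by ring]

-- ===== VERDICT (by name: the statement is the Claim_ definition above) =====
theorem find_free_spans_spec : Claim_equal_find_free_spans := by
  intro files _
  show find_free_spans files = find_free_spans_alt files
  simpa [find_free_spans, find_free_spans_alt] using
    pvGoA_eq_pvGoB files.length files (le_refl _) 0 []
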